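-- pv_equiv track=rewrite | github.com/CylexTTY/Lets_Code_Python_Modulo1 | blackJack.py | verificar_vencedor
-- ===== SOURCE A (Python) =====
-- def verificar_vencedor(jodadores):
--     lista_sorteada = sorted(jodadores.items(),
--                             key=lambda x: x[1], reverse=True)
--     ranking = [jogador for jogador in lista_sorteada if jogador[1] > 21]
--     lista_sorteada = sorted(jodadores.items(), key=lambda x: x[1])
--     ranking.extend([jogador
--                    for jogador in
--                     lista_sorteada[:len(lista_sorteada)-len(ranking)]])
--     return ranking[::-1]
-- ===== SOURCE B (Python) =====
-- def verificar_vencedor(jodadores):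
--     # One keyed stable sort; later-added players rank ahead of equal scores.
--     def chave(jogador):
--         pontos = jogador[1]
--         if pontos > 21:
--             return (1, pontos)
--         return (0, -pontos)
--     return sorted(reversed(list(jodadores.items())), key=chave)
-- ===== Notes on version B (the rewrite author's own statement) =====
-- stated objective: simpler
-- what changed: Replaces A's two full sorts, a filter, a length-arithmetic slice and a final reversal by one stable sort of the players in reverse insertion order under the composite key (0, -score) for scores <= 21 and (1, score) for busted scores.
import Mathlib
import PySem

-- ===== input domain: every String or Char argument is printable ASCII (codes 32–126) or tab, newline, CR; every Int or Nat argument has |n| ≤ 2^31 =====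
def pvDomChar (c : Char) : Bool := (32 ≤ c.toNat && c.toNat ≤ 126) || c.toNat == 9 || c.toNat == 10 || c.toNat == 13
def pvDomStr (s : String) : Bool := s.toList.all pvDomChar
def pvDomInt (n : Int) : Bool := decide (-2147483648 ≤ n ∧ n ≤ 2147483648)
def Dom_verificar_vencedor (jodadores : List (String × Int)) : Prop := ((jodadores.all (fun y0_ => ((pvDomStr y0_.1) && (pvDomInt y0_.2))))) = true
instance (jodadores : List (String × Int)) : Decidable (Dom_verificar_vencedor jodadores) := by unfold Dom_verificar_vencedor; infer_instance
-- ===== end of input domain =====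

-- B replaces A's two full sorts plus filter/slice/reverse bookkeeping by ONE stable keyed
-- sort of the players in reverse insertion order (objective: simpler decomposition).

-- ===== PORT A =====
-- xs[::-1] is ported as List.reverse (exact: PySem.List.slice?_none_none_neg_one).
def verificar_vencedor (jodadores : List (String × Int)) : List (String × Int) :=
  let lista_sorteada := PySem.List.sorted jodadores (fun x => x.2) true
  let ranking := lista_sorteada.filter (fun jogador => decide ((21 : Int) < jogador.2))
  let lista_sorteada2 := PySem.List.sorted jodadores (fun x => x.2) false
  let ranking2 := ranking ++
    PySem.List.slice lista_sorteada2 none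
      (some ((lista_sorteada2.length : Int) - (ranking.length : Int)))
  ranking2.reverse

-- ===== PORT B =====
-- reversed(list(d.items())) is List.reverse; the tuple key (0, -pontos) / (1, pontos) is
-- PySem.List.sorted2 with the two key components (sorted2 is the primitive for tuple keys).
def verificar_vencedor_alt (jodadores : List (String × Int)) : List (String × Int) :=
  PySem.List.sorted2 jodadores.reverse
    (fun jogador => if (21 : Int) < jogador.2 then (1 : Int) else 0)
    (fun jogador => if (21 : Int) < jogador.2 then jogador.2 else -jogador.2) false

-- ===== PRECONDITION & SPEC =====
def Spec_verificar_vencedor (jodadores : List (String × Int)) (out : List (String × Int)) : Prop := out = verificar_vencedor_alt jodadores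
instance (jodadores : List (String × Int)) (out : List (String × Int)) : Decidable (Spec_verificar_vencedor jodadores out) := by unfold Spec_verificar_vencedor; infer_instance

-- ===== CLAIM (what is proved, stated in full; the proofs are below) =====
def Claim_equal_verificar_vencedor : Prop := ∀ (jodadores : List (String × Int)), Dom_verificar_vencedor jodadores → Spec_verificar_vencedor jodadores (verificar_vencedor jodadores)

-- ===== LEMMAS AND PROOFS =====

-- ---- generic stable-insertion machinery (proof-side only) ----

-- inserts y BEFORE the first element whose key is ≥ key y (insertBy puts it AFTER equals)
def insFront {α : Type} (key : α → Int) (y : α) : List α → List α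
  | [] => [y]
  | b :: t => if key b < key y then b :: insFront key y t else y :: b :: t

theorem insertBy_congr_mem {α : Type} (before1 before2 : α → α → Bool) (x : α) (l : List α)
    (h : ∀ b ∈ l, before1 x b = before2 x b) :
    PySem.List.insertBy before1 x l = PySem.List.insertBy before2 x l := by
  induction l with
  | nil => rfl
  | cons b t ih =>
    have hb := h b (by simp)
    simp only [PySem.List.insertBy, hb]
    by_cases h2 : before2 x b = true
    · simp [h2]
    · simp only [h2, if_neg, Bool.not_eq_true] at *
      simp [ih (fun c hc => h c (by simp [hc]))]

theorem insertBy_append_skip {α : Type} (before : α → α → Bool) (x : α) (u v : List α)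
    (h : ∀ b ∈ u, before x b = false) :
    PySem.List.insertBy before x (u ++ v) = u ++ PySem.List.insertBy before x v := by
  induction u with
  | nil => simp
  | cons b t ih =>
    have hb := h b (by simp)
    simp [PySem.List.insertBy, hb, ih (fun c hc => h c (by simp [hc]))]

theorem insertBy_append_enter {α : Type} (before : α → α → Bool) (x : α) (u v : List α)
    (h : ∀ b ∈ v, before x b = true) :
    PySem.List.insertBy before x (u ++ v) = PySem.List.insertBy before x u ++ v := by
  induction u with
  | nil =>
    cases v with
    | nil => rfl
    | cons b t => simp [PySem.List.insertBy, h b (by simp)]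
  | cons b t ih =>
    by_cases hb : before x b = true
    · simp [PySem.List.insertBy, hb]
    · simp only [Bool.not_eq_true] at hb
      simp [PySem.List.insertBy, hb, ih]

theorem insFront_of_forall_lt {α : Type} (key : α → Int) (y : α) (l : List α)
    (h : ∀ b ∈ l, key b < key y) :
    insFront key y l = l ++ [y] := by
  induction l with
  | nil => rfl
  | cons b t ih => simp [insFront, h b (by simp), ih (fun c hc => h c (by simp [hc]))]

theorem insFront_append_last {α : Type} (key : α → Int) (y a : α) (u : List α)
    (h : ¬ key a < key y) :
    insFront key y (u ++ [a]) = insFront key y u ++ [a] := by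
  induction u with
  | nil => simp [insFront, h]
  | cons b t ih =>
    by_cases hb : key b < key y
    · simp [insFront, hb, ih]
    · simp [insFront, hb]

theorem insertBy_insFront_comm {α : Type} (key : α → Int) (y z : α) (acc : List α) :
    PySem.List.insertBy (fun a b => decide (key a < key b)) z (insFront key y acc)
      = insFront key y (PySem.List.insertBy (fun a b => decide (key a < key b)) z acc) := by
  induction acc with
  | nil =>
    by_cases hzy : key z < key y <;>
      simp [insFront, PySem.List.insertBy, hzy]
  | cons a t ih =>
    by_cases h1 : key a < key y
    · by_cases h2 : key z < key a
      · have hzy : key z < key y := lt_trans h2 h1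
        simp [insFront, PySem.List.insertBy, h1, h2, hzy]
      · simp [insFront, PySem.List.insertBy, h1, h2, ih]
    · by_cases h2 : key z < key a
      · by_cases hzy : key z < key y <;>
          simp [insFront, PySem.List.insertBy, h1, h2, hzy]
      · have hzy : ¬ key z < key y := by omega
        simp [insFront, PySem.List.insertBy, h1, h2, hzy]

theorem foldl_insertBy_insFront {α : Type} (key : α → Int) (y : α) (m : List α) :
    ∀ acc : List α,
    m.foldl (fun acc x => PySem.List.insertBy (fun a b => decide (key a < key b)) x acc)
        (insFront key y acc)
      = insFront key y
          (m.foldl (fun acc x => PySem.List.insertBy (fun a b => decide (key a < key b)) x acc) acc) := by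
  induction m with
  | nil => intro acc; rfl
  | cons x t ih =>
    intro acc
    simp only [List.foldl_cons, insertBy_insFront_comm key y x acc, ih]

theorem insFront_reverse {α : Type} (key : α → Int) (y : α) (s : List α)
    (hpw : s.Pairwise (fun a b => key b ≤ key a)) :
    insFront key y s.reverse
      = (PySem.List.insertBy (fun a b => decide (key b < key a)) y s).reverse := by
  induction s with
  | nil => rfl
  | cons a t ih =>
    rcases List.pairwise_cons.mp hpw with ⟨ha, ht⟩
    by_cases h1 : key a < key y
    · have hall : ∀ b ∈ t.reverse ++ [a], key b < key y := by
        intro b hb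
        rcases List.mem_append.mp hb with h | h
        · exact lt_of_le_of_lt (ha b (List.mem_reverse.mp h)) h1
        · simp at h; subst h; exact h1
      simp [PySem.List.insertBy, h1, insFront_of_forall_lt key y _ hall]
    · simp [PySem.List.insertBy, h1, insFront_append_last key y a _ h1, ih ht]

-- stable sort of the reversed list = reverse of the reverse-stable sort (and vice versa)
theorem sorted_reverse_false {α : Type} (key : α → Int) (xs : List α) :
    PySem.List.sorted xs.reverse key false = (PySem.List.sorted xs key true).reverse := by
  induction xs using List.reverseRecOn with
  | nil => rfl
  | append_singleton ys y ih =>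
    rw [PySem.List.sorted_eq_foldl_insertBy, List.reverse_append, List.reverse_singleton,
      List.singleton_append, List.foldl_cons]
    have h0 : PySem.List.insertBy (fun a b => decide (key a < key b)) y ([] : List α)
        = insFront key y [] := rfl
    rw [h0, foldl_insertBy_insFront, ← PySem.List.sorted_eq_foldl_insertBy, ih,
      insFront_reverse key y _ (PySem.List.sorted_pairwise_rev ys key),
      PySem.List.sorted_rev_eq_foldl_insertBy (ys ++ [y]) key, List.foldl_append,
      List.foldl_cons, List.foldl_nil, ← PySem.List.sorted_rev_eq_foldl_insertBy]

theorem sorted_neg_false {α : Type} (key : α → Int) (m : List α) :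
    PySem.List.sorted m (fun x => -(key x)) false = PySem.List.sorted m key true := by
  rw [PySem.List.sorted_eq_foldl_insertBy, PySem.List.sorted_rev_eq_foldl_insertBy]
  congr 1
  funext acc x
  congr 1
  funext a b
  simp

theorem sorted_neg_true {α : Type} (key : α → Int) (m : List α) :
    PySem.List.sorted m (fun x => -(key x)) true = PySem.List.sorted m key false := by
  rw [PySem.List.sorted_rev_eq_foldl_insertBy, PySem.List.sorted_eq_foldl_insertBy]
  congr 1
  funext acc x
  congr 1
  funext a b
  simp

theorem sorted_reverse_true {α : Type} (key : α → Int) (xs : List α) :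
    PySem.List.sorted xs.reverse key true = (PySem.List.sorted xs key false).reverse := by
  have h := sorted_reverse_false (fun x => -(key x)) xs
  rwa [sorted_neg_false, sorted_neg_true] at h

-- ---- the one sorted2 run splits into the two key groups ----

theorem sorted2_foldl (m : List (String × Int)) :
    PySem.List.sorted2 m
        (fun jogador => if (21 : Int) < jogador.2 then (1 : Int) else 0)
        (fun jogador => if (21 : Int) < jogador.2 then jogador.2 else -jogador.2) false
      = m.foldl (fun acc x => PySem.List.insertBy
          (fun a b =>
            decide ((if (21 : Int) < a.2 then (1 : Int) else 0) < (if (21 : Int) < b.2 then (1 : Int) else 0)) ||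
            (!decide ((if (21 : Int) < b.2 then (1 : Int) else 0) < (if (21 : Int) < a.2 then (1 : Int) else 0)) &&
             decide ((if (21 : Int) < a.2 then a.2 else -a.2) < (if (21 : Int) < b.2 then b.2 else -b.2)))) x acc) [] := rfl

theorem sorted2_split (m : List (String × Int)) :
    PySem.List.sorted2 m
        (fun jogador => if (21 : Int) < jogador.2 then (1 : Int) else 0)
        (fun jogador => if (21 : Int) < jogador.2 then jogador.2 else -jogador.2) false
      = PySem.List.sorted (m.filter (fun x => !decide ((21 : Int) < x.2))) (fun x => x.2) true
        ++ PySem.List.sorted (m.filter (fun x => decide ((21 : Int) < x.2))) (fun x => x.2) false := by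
  induction m using List.reverseRecOn with
  | nil => rfl
  | append_singleton u x ih =>
    rw [sorted2_foldl, List.foldl_append, List.foldl_cons, List.foldl_nil, ← sorted2_foldl, ih]
    by_cases hx : (21 : Int) < x.2
    · -- busted: skip the whole non-busted block, then a plain ascending insert
      rw [insertBy_append_skip _ x _ _ (by
        intro b hb
        have hbq := List.of_mem_filter ((PySem.List.mem_sorted _ _ _ _).mp hb)
        simp only [Bool.not_eq_true', decide_eq_false_iff_not] at hbq
        simp [hx, hbq])]
      rw [insertBy_congr_mem _ (fun a b => decide (a.2 < b.2)) x _ (by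
        intro b hb
        have hbp := List.of_mem_filter ((PySem.List.mem_sorted _ _ _ _).mp hb)
        simp only [decide_eq_true_eq] at hbp
        simp [hx, hbp])]
      have hfq : (u ++ [x]).filter (fun x => !decide ((21 : Int) < x.2))
          = u.filter (fun x => !decide ((21 : Int) < x.2)) := by simp [hx]
      have hfp : (u ++ [x]).filter (fun x => decide ((21 : Int) < x.2))
          = u.filter (fun x => decide ((21 : Int) < x.2)) ++ [x] := by simp [hx]
      rw [hfq, hfp]
      rw [PySem.List.sorted_eq_foldl_insertBy (u.filter (fun x => decide ((21 : Int) < x.2)) ++ [x]),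
        List.foldl_append, List.foldl_cons, List.foldl_nil, ← PySem.List.sorted_eq_foldl_insertBy]
    · -- not busted: insertion stays inside the non-busted block (a reverse-stable insert)
      rw [insertBy_append_enter _ x _ _ (by
        intro b hb
        have hbp := List.of_mem_filter ((PySem.List.mem_sorted _ _ _ _).mp hb)
        simp only [decide_eq_true_eq] at hbp
        simp [hx, hbp])]
      rw [insertBy_congr_mem _ (fun a b => decide (b.2 < a.2)) x _ (by
        intro b hb
        have hbq := List.of_mem_filter ((PySem.List.mem_sorted _ _ _ _).mp hb)
        simp only [Bool.not_eq_true', decide_eq_false_iff_not] at hbq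
        simp [hx, hbq])]
      have hfq : (u ++ [x]).filter (fun x => !decide ((21 : Int) < x.2))
          = u.filter (fun x => !decide ((21 : Int) < x.2)) ++ [x] := by simp [hx]
      have hfp : (u ++ [x]).filter (fun x => decide ((21 : Int) < x.2))
          = u.filter (fun x => decide ((21 : Int) < x.2)) := by simp [hx]
      rw [hfq, hfp]
      rw [PySem.List.sorted_rev_eq_foldl_insertBy (u.filter (fun x => !decide ((21 : Int) < x.2)) ++ [x]),
        List.foldl_append, List.foldl_cons, List.foldl_nil, ← PySem.List.sorted_rev_eq_foldl_insertBy]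

-- ---- A-side: the filter / slice bookkeeping named ----

theorem insertBy_eq_cons {α : Type} (before : α → α → Bool) (x : α) (l : List α)
    (h : ∀ b ∈ l, before x b = true) :
    PySem.List.insertBy before x l = x :: l := by
  cases l with
  | nil => rfl
  | cons a t => simp [PySem.List.insertBy, h a (by simp)]

theorem filter_insertBy {α : Type} (before : α → α → Bool) (p : α → Bool) (x : α)
    (acc : List α)
    (hmono : acc.Pairwise (fun a b => before x a = true → before x b = true)) :
    (PySem.List.insertBy before x acc).filter p
      = if p x then PySem.List.insertBy before x (acc.filter p) else acc.filter p := by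
  induction acc with
  | nil => cases hpx : p x <;> simp [PySem.List.insertBy, List.filter, hpx]
  | cons a t ih =>
    rcases List.pairwise_cons.mp hmono with ⟨ha, ht⟩
    by_cases hba : before x a = true
    · rw [show PySem.List.insertBy before x (a :: t) = x :: a :: t by
        simp [PySem.List.insertBy, hba]]
      cases hpx : p x with
      | false => simp [List.filter_cons, hpx]
      | true =>
        have hx : PySem.List.insertBy before x ((a :: t).filter p) = x :: (a :: t).filter p := by
          apply insertBy_eq_cons
          intro b hb
          rcases List.mem_filter.mp hb with ⟨hb', _⟩
          rcases List.mem_cons.mp hb' with h | h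
          · subst h; exact hba
          · exact ha b h hba
        rw [hx, if_pos rfl, List.filter_cons_of_pos hpx]
    · rw [show PySem.List.insertBy before x (a :: t) = a :: PySem.List.insertBy before x t by
        simp [PySem.List.insertBy, hba]]
      have hIH := ih ht
      by_cases hpa : p a = true
      · rw [List.filter_cons_of_pos hpa, hIH, List.filter_cons_of_pos hpa]
        cases hpx : p x with
        | false => simp
        | true =>
          rw [if_pos rfl, if_pos rfl,
            show PySem.List.insertBy before x (a :: t.filter p)
                = a :: PySem.List.insertBy before x (t.filter p) by
              simp [PySem.List.insertBy, hba]]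
      · rw [List.filter_cons_of_neg (by simpa using hpa), hIH,
          List.filter_cons_of_neg (by simpa using hpa)]

theorem insertBy_pairwise_false {α : Type} (before : α → α → Bool) (x : α) (acc : List α)
    (hasym : ∀ a b, before a b = true → before b a = false)
    (htr : ∀ y c a, before c a = false → before y a = true → before c y = false)
    (hpw : acc.Pairwise (fun a b => before b a = false)) :
    (PySem.List.insertBy before x acc).Pairwise (fun a b => before b a = false) := by
  induction acc with
  | nil => simp [PySem.List.insertBy]
  | cons a t ih =>
    rcases List.pairwise_cons.mp hpw with ⟨hat, ht⟩
    by_cases hba : before x a = true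
    · rw [show PySem.List.insertBy before x (a :: t) = x :: a :: t by
        simp [PySem.List.insertBy, hba]]
      refine List.pairwise_cons.mpr ⟨?_, hpw⟩
      intro y hy
      rcases List.mem_cons.mp hy with h | h
      · subst h; exact hasym _ _ hba
      · exact htr x y a (hat y h) hba
    · rw [show PySem.List.insertBy before x (a :: t) = a :: PySem.List.insertBy before x t by
        simp [PySem.List.insertBy, hba]]
      refine List.pairwise_cons.mpr ⟨?_, ih ht⟩
      intro y hy
      rcases (PySem.List.mem_insertBy _ _ _ _).mp hy with h | h
      · subst h; simpa using hba
      · exact hat y h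

theorem filter_foldl_insertBy {α : Type} (before : α → α → Bool) (p : α → Bool)
    (hasym : ∀ a b, before a b = true → before b a = false)
    (htr : ∀ y c a, before c a = false → before y a = true → before c y = false)
    (hco : ∀ y a b, before b a = false → before y a = true → before y b = true) :
    ∀ (l acc : List α), acc.Pairwise (fun a b => before b a = false) →
    (l.foldl (fun acc x => PySem.List.insertBy before x acc) acc).filter p
      = (l.filter p).foldl (fun acc x => PySem.List.insertBy before x acc) (acc.filter p) := by
  intro l
  induction l with
  | nil => intro acc _; simp
  | cons x l ih =>
    intro acc hpw
    have hmono : acc.Pairwise (fun a b => before x a = true → before x b = true) :=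
      hpw.imp (fun h => hco x _ _ h)
    have hstep := filter_insertBy before p x acc hmono
    have hpw' := insertBy_pairwise_false before x acc hasym htr hpw
    cases hpx : p x with
    | true =>
      simp only [List.foldl_cons, List.filter_cons, hpx]
      rw [ih _ hpw', hstep, hpx]
      simp
    | false =>
      simp only [List.foldl_cons, List.filter_cons, hpx]
      rw [ih _ hpw', hstep, hpx]
      simp

theorem filter_sorted (l : List (String × Int)) (p : String × Int → Bool) (rev : Bool) :
    (PySem.List.sorted l (fun x => x.2) rev).filter p
      = PySem.List.sorted (l.filter p) (fun x => x.2) rev := by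
  cases rev with
  | false =>
    rw [PySem.List.sorted_eq_foldl_insertBy, PySem.List.sorted_eq_foldl_insertBy]
    have := filter_foldl_insertBy
      (fun a b : String × Int => decide (a.2 < b.2)) p
      (by intro a b h; simp at h ⊢; omega)
      (by intro y c a h1 h2; simp at h1 h2 ⊢; omega)
      (by intro y a b h1 h2; simp at h1 h2 ⊢; omega)
      l [] (by simp)
    simpa using this
  | true =>
    rw [PySem.List.sorted_rev_eq_foldl_insertBy, PySem.List.sorted_rev_eq_foldl_insertBy]
    have := filter_foldl_insertBy
      (fun a b : String × Int => decide (b.2 < a.2)) p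
      (by intro a b h; simp at h ⊢; omega)
      (by intro y c a h1 h2; simp at h1 h2 ⊢; omega)
      (by intro y a b h1 h2; simp at h1 h2 ⊢; omega)
      l [] (by simp)
    simpa using this

theorem take_countP_of_pairwise (l : List (String × Int)) (q : String × Int → Bool)
    (hdc : ∀ a b : String × Int, a.2 ≤ b.2 → q b = true → q a = true)
    (hpw : l.Pairwise (fun a b => a.2 ≤ b.2)) :
    l.take (l.countP q) = l.filter q := by
  induction l with
  | nil => simp
  | cons a t ih =>
    rcases List.pairwise_cons.mp hpw with ⟨hall, ht⟩
    cases hqa : q a with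
    | true =>
      rw [List.countP_cons_of_pos (by simpa using hqa)]
      simp [hqa, ih ht]
    | false =>
      have hnone : ∀ b ∈ t, q b = false := by
        intro b hb
        cases hqb : q b with
        | false => rfl
        | true => exact absurd (hdc a b (hall b hb) hqb) (by simp [hqa])
      have hct : t.countP q = 0 := List.countP_eq_zero.mpr (by
        intro b hb; simp [hnone b hb])
      have hft : t.filter q = [] := List.filter_eq_nil_iff.mpr (by
        intro b hb; simp [hnone b hb])
      rw [List.countP_cons_of_neg (by simp [hqa])]
      simp [hqa, hct, hft]

theorem verificar_vencedor_eq_parts (l : List (String × Int)) :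
    verificar_vencedor l
      = (PySem.List.sorted (l.filter (fun x => !decide ((21 : Int) < x.2))) (fun x => x.2) false).reverse
        ++ (PySem.List.sorted (l.filter (fun x => decide ((21 : Int) < x.2))) (fun x => x.2) true).reverse := by
  unfold verificar_vencedor
  simp only []
  set p : String × Int → Bool := fun x => decide ((21 : Int) < x.2) with hp
  set q : String × Int → Bool := fun x => !decide ((21 : Int) < x.2) with hq
  set f : String × Int → Int := fun x => x.2 with hf
  set asc := PySem.List.sorted l f false with hasc
  set desc := PySem.List.sorted l f true with hdesc
  have hrank : desc.filter p = PySem.List.sorted (l.filter p) f true := filter_sorted l p true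
  have hk : (desc.filter p).length = l.countP p := by
    rw [← List.countP_eq_length_filter]
    exact ((PySem.List.sorted_perm l f true).countP_eq p)
  have hn : asc.length = l.length := PySem.List.length_sorted l f false
  have hkn : l.countP p ≤ l.length := List.countP_le_length
  have hb : (0 : Int) ≤ (asc.length : Int) - ((desc.filter p).length : Int) := by
    rw [hk, hn]; omega
  rw [PySem.List.slice_to asc hb]
  have htonat : ((asc.length : Int) - ((desc.filter p).length : Int)).toNat
      = asc.countP q := by
    have hcq : asc.countP q = l.countP q := (PySem.List.sorted_perm l f false).countP_eq q
    have hsum : l.length = l.countP p + l.countP q := by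
      have := List.length_eq_countP_add_countP p (l := l)
      rw [this]
      congr 1
      apply List.countP_congr
      intro a _
      simp [hp, hq]
    rw [hk, hn, hcq]
    omega
  rw [htonat]
  have htake : asc.take (asc.countP q) = asc.filter q := by
    apply take_countP_of_pairwise
    · intro a b hab hqb; simp [hq] at hqb ⊢; omega
    · exact PySem.List.sorted_pairwise l f
  rw [htake]
  have hascq : asc.filter q = PySem.List.sorted (l.filter q) f false := filter_sorted l q false
  rw [hrank, hascq, List.reverse_append]

-- ===== VERDICT (by name: the statement is the Claim_ definition above) =====
theorem verificar_vencedor_spec : Claim_equal_verificar_vencedor := by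
  intro l _
  unfold Spec_verificar_vencedor verificar_vencedor_alt
  rw [verificar_vencedor_eq_parts, sorted2_split, List.filter_reverse, List.filter_reverse,
    sorted_reverse_true, sorted_reverse_false]
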